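-- pv_equiv track=rewrite | github.com/LilianaLukash/Master1 | symbols.py | real_len
-- ===== SOURCE A (Python) =====
-- def real_len(text):
--
--     simb =  ["\n", "\f", "\r", "\t", "\v"]
--     length = len(text)
--     result = length
--     for letter in text:
--         if letter in simb:
--             result-=1
--     return result
-- ===== SOURCE B (Python) =====
-- def real_len(text):
--     simb = ["\n", "\f", "\r", "\t", "\v"]
--     return len(text) - sum(text.count(w) for w in simb)
-- ===== Notes on version B (the rewrite author's own statement) =====
-- stated objective: faster
-- what changed: Replaces the per-character Python loop with a membership test by len(text) minus a sum of text.count(w) over the fixed 5 whitespace symbols (C-level scans).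
import Mathlib
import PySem

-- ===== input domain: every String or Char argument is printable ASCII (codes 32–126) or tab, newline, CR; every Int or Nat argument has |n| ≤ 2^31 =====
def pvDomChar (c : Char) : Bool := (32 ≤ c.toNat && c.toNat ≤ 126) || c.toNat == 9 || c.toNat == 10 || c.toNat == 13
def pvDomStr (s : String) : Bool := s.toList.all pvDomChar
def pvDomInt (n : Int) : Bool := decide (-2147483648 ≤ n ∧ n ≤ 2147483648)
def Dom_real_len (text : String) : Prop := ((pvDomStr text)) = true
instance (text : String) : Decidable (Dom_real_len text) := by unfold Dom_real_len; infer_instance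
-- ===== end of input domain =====

-- B computes len(text) minus the sum of text.count(w) over the 5 whitespace symbols, instead of A's per-character loop (measured faster: C-level count scans).


-- ===== PORT A =====
def real_len (text : String) : Int :=
  let simb : List Char := ['\n', '\x0c', '\r', '\t', '\x0b']
  let length : Int := text.toList.length
  let result : Int := length
  text.toList.foldl (fun result letter => if letter ∈ simb then result - 1 else result) result

-- ===== PORT B =====
def real_len_alt (text : String) : Int :=
  let simb : List String := ["\n", "\x0c", "\r", "\t", "\x0b"]
  (PySem.Str.len text : Int) - ((simb.map (fun w => (PySem.Str.count text w : Int))).sum)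

-- ===== PRECONDITION & SPEC =====
def Spec_real_len (text : String) (out : Int) : Prop := out = real_len_alt text
instance (text : String) (out : Int) : Decidable (Spec_real_len text out) := by unfold Spec_real_len; infer_instance

-- ===== CLAIM (what is proved, stated in full; the proofs are below) =====
def Claim_equal_real_len : Prop := ∀ (text : String), Dom_real_len text → Spec_real_len text (real_len text)

-- ===== LEMMAS AND PROOFS =====

-- count.go with a single-char needle counts occurrences of that char (given enough fuel)
theorem count_go_singleton (c : Char) :
    ∀ (fuel : Nat) (l : List Char) (acc : Nat), l.length ≤ fuel →
      PySem.Chars.count.go [c] fuel l acc = acc + l.count c := by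
  intro fuel
  induction fuel with
  | zero =>
    intro l acc h
    match l with
    | [] => simp [PySem.Chars.count.go]
    | x :: t => simp at h
  | succ n ih =>
    intro l acc h
    match l with
    | [] => simp [PySem.Chars.count.go]
    | x :: t =>
      have hd : List.drop ([c].length) (x :: t) = t := by simp
      by_cases hx : x = c
      · have hp : [c].isPrefixOf (x :: t) = true := by simp [List.isPrefixOf, hx]
        simp only [PySem.Chars.count.go, hp, if_true, hd]
        rw [ih t (acc + 1) (Nat.le_of_succ_le_succ (by simpa using h))]
        simp [List.count_cons, hx]
        omega
      · have hp : [c].isPrefixOf (x :: t) = false := by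
          simp [List.isPrefixOf]
          exact fun hh => hx hh.symm
        simp only [PySem.Chars.count.go, hp, Bool.false_eq_true, if_false]
        rw [ih t acc (Nat.le_of_succ_le_succ (by simpa using h))]
        simp [List.count_cons, hx]

theorem str_count_singleton (s t : String) (c : Char) (ht : t.toList = [c]) :
    PySem.Str.count s t = s.toList.count c := by
  rw [PySem.Str.count_eq, ht]
  simp only [PySem.Chars.count]
  have : ([c].isEmpty) = false := by simp
  rw [this]
  simp only [Bool.false_eq_true, if_false]
  simpa using count_go_singleton c s.toList.length s.toList 0 le_rfl

-- the subtracting loop equals length minus countP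
theorem foldl_sub_one (p : Char → Prop) [DecidablePred p] :
    ∀ (l : List Char) (a : Int),
      l.foldl (fun r c => if p c then r - 1 else r) a = a - l.countP (fun c => decide (p c)) := by
  intro l
  induction l with
  | nil => simp
  | cons x t ih =>
    intro a
    by_cases hx : p x <;> simp [List.foldl, hx, ih, List.countP_cons] <;> omega

theorem countP_mem_simb (l : List Char) :
    (l.countP (fun c => decide (c ∈ ['\n', '\x0c', '\r', '\t', '\x0b'])) : Int) =
      (l.count '\n' : Int) + l.count '\x0c' + l.count '\r' + l.count '\t' + l.count '\x0b' := by
  induction l with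
  | nil => simp
  | cons x t ih =>
    simp only [List.countP_cons, List.count_cons]
    by_cases h1 : x = '\n' <;> by_cases h2 : x = '\x0c' <;> by_cases h3 : x = '\r' <;>
      by_cases h4 : x = '\t' <;> by_cases h5 : x = '\x0b' <;>
      simp_all <;> push_cast <;> omega

-- ===== VERDICT (by name: the statement is the Claim_ definition above) =====
theorem real_len_spec : Claim_equal_real_len := by
  intro text _
  unfold Spec_real_len real_len real_len_alt
  simp only [List.map, List.sum_cons, List.sum_nil, PySem.Str.len]
  rw [str_count_singleton text "\n" '\n' (by simp), str_count_singleton text "\x0c" '\x0c' (by simp),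
    str_count_singleton text "\r" '\r' (by simp), str_count_singleton text "\t" '\t' (by simp),
    str_count_singleton text "\x0b" '\x0b' (by simp)]
  rw [foldl_sub_one (fun c => c ∈ ['\n', '\x0c', '\r', '\t', '\x0b'])]
  rw [countP_mem_simb]
  ring
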